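-- pv_equiv track=rewrite | github.com/joe-arbo/joe-arbo | Artificial Intelligence/p5/dpll.py | unit_clause_assign
-- ===== SOURCE A (Python) =====
-- def unit_clause_assign(clause, model):
--     P, value = None, None
--     for literal in clause:
--         sym, positive = inspect_literal(literal)
--
--         if sym in model:
--             if model[sym] == positive:
--                 return None, None
--         elif P:
--             return None, None
--         else:
--             P, value = sym, positive
--     return P, value
--
-- def inspect_literal(literal):
--     if literal > 0:
--         return literal, True
--     else:
--         return abs(literal), False
-- ===== SOURCE B (Python) =====
-- def unit_clause_assign(clause, model):
--     lits = [(abs(l), l > 0) for l in clause]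
--     if any(model.get(sym) == positive for sym, positive in lits):
--         return None, None
--     unassigned = [lp for lp in lits if lp[0] not in model]
--     if len(unassigned) == 1:
--         return unassigned[0]
--     return None, None
-- ===== Notes on version B (the rewrite author's own statement) =====
-- stated objective: simpler
-- what changed: Replaces A's stateful single-slot early-exit scan (P/value mutated in the loop, elif-P early return) with a collect-then-decide decomposition: normalize literals, one pass checking satisfaction via dict.get, then build the list of unassigned literals and return its sole element iff it is a singleton.
-- intended difference: On clauses with no satisfied literal whose >=2 unassigned literals are all the degenerate literal 0 except the last, A's 'elif P:' truthiness test treats the slot P==0 as empty so later literals overwrite it and A returns the last unassigned literal as a forced unit; B returns (None, None) since such a clause is not a unit clause, which is the intended behaviour. — e.g. on unit_clause_assign([0, 2], []): A returns (some 2, some true), B returns (none, none)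
import Mathlib
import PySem

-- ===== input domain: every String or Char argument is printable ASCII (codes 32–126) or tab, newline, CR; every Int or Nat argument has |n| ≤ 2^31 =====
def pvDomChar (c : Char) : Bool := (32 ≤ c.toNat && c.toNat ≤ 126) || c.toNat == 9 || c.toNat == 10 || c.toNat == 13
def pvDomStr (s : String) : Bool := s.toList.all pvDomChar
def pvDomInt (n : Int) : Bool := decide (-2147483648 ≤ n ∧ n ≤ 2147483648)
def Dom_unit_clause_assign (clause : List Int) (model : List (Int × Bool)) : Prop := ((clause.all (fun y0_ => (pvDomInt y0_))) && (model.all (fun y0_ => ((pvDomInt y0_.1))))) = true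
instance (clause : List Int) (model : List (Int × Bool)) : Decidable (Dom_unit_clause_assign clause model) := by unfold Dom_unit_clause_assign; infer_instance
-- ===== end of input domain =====

-- B replaces A's stateful single-slot early-exit scan with a collect-then-decide
-- decomposition (satisfaction pass, then the list of unassigned literals): simpler.

-- Python dict lookup (first match in the association list), shared dict primitive
def mlookup (model : List (Int × Bool)) (sym : Int) : Option Bool :=
  (model.find? (fun p => p.1 == sym)).map (·.2)

-- ===== PORT A =====
-- Python truthiness of P (None or an int)
def pyTruthy : Option Int → Bool
  | none => false
  | some n => n != 0

-- inspect_literal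
def inspect_literal (literal : Int) : Int × Bool :=
  if literal > 0 then (literal, true) else (|literal|, false)

-- the for-loop of A, carrying the mutable state P, value
def unitLoopA (model : List (Int × Bool)) : List Int → Option Int → Option Bool → Option Int × Option Bool
  | [], P, value => (P, value)
  | literal :: rest, P, value =>
    let sp := inspect_literal literal
    match mlookup model sp.1 with
    | some b => if b == sp.2 then (none, none) else unitLoopA model rest P value
    | none =>
      if pyTruthy P then (none, none)
      else unitLoopA model rest (some sp.1) (some sp.2)

def unit_clause_assign (clause : List Int) (model : List (Int × Bool)) : Option Int × Option Bool :=
  unitLoopA model clause none none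

-- ===== PORT B =====
def unit_clause_assign_alt (clause : List Int) (model : List (Int × Bool)) : Option Int × Option Bool :=
  let lits := clause.map (fun l => ((|l| : Int), decide (l > 0)))
  if lits.any (fun sp => mlookup model sp.1 == some sp.2) then (none, none)
  else
    match lits.filter (fun sp => mlookup model sp.1 == none) with
    | [sp] => (some sp.1, some sp.2)
    | _ => (none, none)

-- ===== PRECONDITION & SPEC =====
-- On clauses with no satisfied literal whose ≥2 unassigned literals are all the degenerate
-- literal 0 except the last, A's 'elif P:' truthiness test treats the slot P==0 as empty so
-- later literals overwrite it and A returns the last unassigned literal as a forced unit;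
-- B returns (None, None) since such a clause is not a unit clause, the intended behaviour.
def D_unit_clause_assign (clause : List Int) (model : List (Int × Bool)) : Prop :=
  let u := clause.filter (fun l => mlookup model |l| == none)
  (∀ l ∈ clause, mlookup model |l| ≠ some (decide (l > 0))) ∧ 2 ≤ u.length ∧ ∀ l ∈ u.dropLast, l = 0

instance (clause : List Int) (model : List (Int × Bool)) : Decidable (D_unit_clause_assign clause model) := by
  unfold D_unit_clause_assign; infer_instance

def Spec_unit_clause_assign (clause : List Int) (model : List (Int × Bool)) (out : Option Int × Option Bool) : Prop := ¬ D_unit_clause_assign clause model → out = unit_clause_assign_alt clause model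
instance (clause : List Int) (model : List (Int × Bool)) (out : Option Int × Option Bool) : Decidable (Spec_unit_clause_assign clause model out) := by unfold Spec_unit_clause_assign; infer_instance

def pvDiffWitness_unit_clause_assign : List Int × (List (Int × Bool)) := ([0, 2], [])
def pvDiffWitnessOut_unit_clause_assign : (Option Int × Option Bool) × (Option Int × Option Bool) :=
  ((some 2, some true), (none, none))

-- ===== CLAIM (what is proved, stated in full; the proofs are below) =====
def Claim_unchanged_unit_clause_assign : Prop := ∀ (clause : List Int) (model : List (Int × Bool)), Dom_unit_clause_assign clause model → Spec_unit_clause_assign clause model (unit_clause_assign clause model)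
def Claim_changed_unit_clause_assign : Prop := Dom_unit_clause_assign (pvDiffWitness_unit_clause_assign.1) (pvDiffWitness_unit_clause_assign.2) ∧ D_unit_clause_assign (pvDiffWitness_unit_clause_assign.1) (pvDiffWitness_unit_clause_assign.2) ∧ unit_clause_assign (pvDiffWitness_unit_clause_assign.1) (pvDiffWitness_unit_clause_assign.2) = pvDiffWitnessOut_unit_clause_assign.1 ∧ unit_clause_assign_alt (pvDiffWitness_unit_clause_assign.1) (pvDiffWitness_unit_clause_assign.2) = pvDiffWitnessOut_unit_clause_assign.2 ∧ pvDiffWitnessOut_unit_clause_assign.1 ≠ pvDiffWitnessOut_unit_clause_assign.2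
def Claim_exact_unit_clause_assign : Prop := ∀ (clause : List Int) (model : List (Int × Bool)), Dom_unit_clause_assign clause model → D_unit_clause_assign clause model → unit_clause_assign clause model ≠ unit_clause_assign_alt clause model

-- ===== LEMMAS AND PROOFS =====

-- literal l of the clause is satisfied / unassigned under model (proof-only abbreviations)
def satLit (model : List (Int × Bool)) (l : Int) : Bool :=
  mlookup model |l| == some (decide (l > 0))

def unassLit (model : List (Int × Bool)) (l : Int) : Bool :=
  mlookup model |l| == none

theorem unass_eta (model : List (Int × Bool)) :
    (fun l : Int => mlookup model |l| == none) = unassLit model := rfl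

-- A's loop restricted to the unassigned literals (proof-only abstraction)
def gLoop : List Int → Option Int → Option Bool → Option Int × Option Bool
  | [], P, value => (P, value)
  | l :: ls, P, _ =>
    if pyTruthy P then (none, none)
    else gLoop ls (some |l|) (some (decide (l > 0)))

theorem inspect_fst (l : Int) : (inspect_literal l).1 = |l| := by
  simp only [inspect_literal]
  split
  · next h => simp [abs_of_pos h]
  · rfl

theorem inspect_snd (l : Int) : (inspect_literal l).2 = decide (l > 0) := by
  simp only [inspect_literal]
  split
  · next h => simp [h]
  · next h => simp [h]

theorem loopA_sat (model : List (Int × Bool)) :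
    ∀ (clause : List Int) (P : Option Int) (v : Option Bool),
      clause.any (satLit model) = true → unitLoopA model clause P v = (none, none) := by
  intro clause
  induction clause with
  | nil => simp
  | cons l ls ih =>
    intro P v h
    simp only [List.any_cons, Bool.or_eq_true] at h
    simp only [unitLoopA, inspect_fst, inspect_snd]
    rcases h with h | h
    · simp only [satLit, beq_iff_eq] at h
      simp [h]
    · cases hm : mlookup model |l| with
      | some b =>
        by_cases hb : b = decide (l > 0)
        · simp [hb]
        · simp only [show (b == decide (l > 0)) = false by simp [hb]]
          simp [ih _ _ h]
      | none =>
        by_cases hp : pyTruthy P = true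
        · simp [hp]
        · simp only [Bool.not_eq_true] at hp
          simp [hp, ih _ _ h]

theorem loopA_eq_gLoop (model : List (Int × Bool)) :
    ∀ (clause : List Int) (P : Option Int) (v : Option Bool),
      clause.all (fun l => !satLit model l) = true →
      unitLoopA model clause P v = gLoop (clause.filter (unassLit model)) P v := by
  intro clause
  induction clause with
  | nil => simp [unitLoopA, gLoop]
  | cons l ls ih =>
    intro P v h
    simp only [List.all_cons, Bool.and_eq_true, Bool.not_eq_true'] at h
    obtain ⟨hl, hls⟩ := h
    simp only [unitLoopA, inspect_fst, inspect_snd, List.filter_cons]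
    cases hm : mlookup model |l| with
    | some b =>
      have hne : (b == decide (l > 0)) = false := by
        simp only [satLit, hm] at hl
        simpa using hl
      have hu : unassLit model l = false := by simp [unassLit, hm]
      simp [hne, hu, ih _ _ hls]
    | none =>
      have hu : unassLit model l = true := by simp [unassLit, hm]
      simp only [hu, if_true]
      by_cases hp : pyTruthy P = true
      · simp [gLoop, hp]
      · simp only [Bool.not_eq_true] at hp
        simp [gLoop, hp, ih _ _ hls]

theorem gLoop_nn :
    ∀ (us : List Int) (P : Option Int) (v : Option Bool),
      (∃ l ∈ us.dropLast, l ≠ 0) → gLoop us P v = (none, none) := by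
  intro us
  induction us with
  | nil => simp
  | cons l ls ih =>
    intro P v h
    by_cases hp : pyTruthy P = true
    · simp [gLoop, hp]
    · simp only [Bool.not_eq_true] at hp
      simp only [gLoop, hp, Bool.false_eq_true, if_false]
      cases ls with
      | nil => simp at h
      | cons l2 ls2 =>
        rw [List.dropLast_cons₂] at h
        rcases h with ⟨x, hx, hx0⟩
        rcases List.mem_cons.mp hx with rfl | hx
        · -- x = l ≠ 0, so the slot is truthy at the next literal
          simp only [gLoop, pyTruthy]
          have : (|x| != 0) = true := by simp; omega
          simp [this]
        · exact ih _ _ ⟨x, hx, hx0⟩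

theorem gLoop_last :
    ∀ (us : List Int) (P : Option Int) (v : Option Bool),
      us ≠ [] → (∀ l ∈ us.dropLast, l = 0) → pyTruthy P = false →
      (gLoop us P v).1 ≠ none := by
  intro us
  induction us with
  | nil => simp
  | cons l ls ih =>
    intro P v _ h0 hp
    simp only [gLoop, hp, Bool.false_eq_true, if_false]
    cases ls with
    | nil => simp [gLoop]
    | cons l2 ls2 =>
      rw [List.dropLast_cons₂] at h0
      have hl0 : l = 0 := h0 l (List.mem_cons_self ..)
      have : pyTruthy (some |l|) = false := by simp [pyTruthy, hl0]
      exact ih _ _ (by simp) (fun x hx => h0 x (List.mem_cons_of_mem _ hx)) this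

-- B's satisfaction test equals clause.any satLit, and its unassigned list is the
-- mapped image of clause.filter unassLit
theorem alt_any (clause : List Int) (model : List (Int × Bool)) :
    ((clause.map (fun l => ((|l| : Int), decide (l > 0)))).any
      (fun sp => mlookup model sp.1 == some sp.2)) = clause.any (satLit model) := by
  rw [List.any_map]; rfl

theorem alt_filter (clause : List Int) (model : List (Int × Bool)) :
    ((clause.map (fun l => ((|l| : Int), decide (l > 0)))).filter
      (fun sp => mlookup model sp.1 == none)) =
    (clause.filter (unassLit model)).map (fun l => ((|l| : Int), decide (l > 0))) := by
  rw [List.filter_map]; rfl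

theorem unit_clause_assign_spec : Claim_unchanged_unit_clause_assign := by
  intro clause model _ hD
  unfold unit_clause_assign unit_clause_assign_alt
  by_cases hs : clause.any (satLit model) = true
  · rw [loopA_sat model clause none none hs]
    have hb : ((clause.map (fun l => ((|l| : Int), decide (l > 0)))).any
        (fun sp => mlookup model sp.1 == some sp.2)) = true := by
      rw [alt_any]; exact hs
    simp [hb]
  · have hall : clause.all (fun l => !satLit model l) = true := by
      simp only [List.all_eq_true, Bool.not_eq_true']
      intro l hl
      by_contra hc
      exact hs (List.any_eq_true.mpr ⟨l, hl, by simpa using hc⟩)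
    rw [loopA_eq_gLoop model clause none none hall]
    simp only [alt_any, hs, alt_filter]
    cases hu : clause.filter (unassLit model) with
    | nil => simp [gLoop]
    | cons l1 ls =>
      cases ls with
      | nil => simp [gLoop, pyTruthy]
      | cons l2 ls2 =>
        have hnn : gLoop (l1 :: l2 :: ls2) none none = (none, none) := by
          apply gLoop_nn
          by_contra hc
          push Not at hc
          refine hD ⟨fun l hl => ?_, ?_, ?_⟩
          · have := (List.all_eq_true.mp hall) l hl
            simpa [satLit] using this
          · rw [unass_eta, hu]; simp
          · rw [unass_eta, hu]; exact fun x hx => hc x hx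
        rw [hnn]
        simp [List.map_cons]

theorem unit_clause_assign_changed : Claim_changed_unit_clause_assign := by
  unfold Claim_changed_unit_clause_assign; decide

theorem unit_clause_assign_tight : Claim_exact_unit_clause_assign := by
  intro clause model _ hD
  obtain ⟨h1, hlen, h0⟩ := hD
  rw [unass_eta] at hlen h0
  have hall : clause.all (fun l => !satLit model l) = true :=
    List.all_eq_true.mpr fun l hl => by simpa [satLit] using h1 l hl
  unfold unit_clause_assign unit_clause_assign_alt
  rw [loopA_eq_gLoop model clause none none hall]
  have hs : clause.any (satLit model) = false := by
    by_contra hc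
    simp only [Bool.not_eq_false] at hc
    rcases List.any_eq_true.mp hc with ⟨l, hl, hlt⟩
    have := (List.all_eq_true.mp hall) l hl
    simp [hlt] at this
  simp only [alt_any, hs, Bool.false_eq_true, if_false, alt_filter]
  have hfst : (gLoop (clause.filter (unassLit model)) none none).1 ≠ none := by
    apply gLoop_last
    · intro hnil; rw [hnil] at hlen; simp at hlen
    · exact h0
    · rfl
  cases hu : clause.filter (unassLit model) with
  | nil => rw [hu] at hlen; simp at hlen
  | cons l1 ls =>
    cases ls with
    | nil => rw [hu] at hlen; simp at hlen
    | cons l2 ls2 =>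
      rw [hu] at hfst
      simp only [List.map_cons]
      intro hc
      rw [hc] at hfst
      simp at hfst
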